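-- pv_equiv track=rewrite | github.com/iamjai-3/legacy-codebase-prd-generator | src/utils/sql_parser.py | _split_column_definitions
-- ===== SOURCE A (Python) =====
-- def _split_column_definitions(columns_str: str) -> list[str]:
--     """Split column definitions handling nested parentheses."""
--     result = []
--     current = ""
--     paren_depth = 0
--
--     for char in columns_str:
--         if char == "(":
--             paren_depth += 1
--             current += char
--         elif char == ")":
--             paren_depth -= 1
--             current += char
--         elif char == "," and paren_depth == 0:
--             if current.strip():
--                 result.append(current.strip())
--             current = ""
--         else:
--             current += char
--
--     if current.strip():
--         result.append(current.strip())
--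
--     return result
-- ===== SOURCE B (Python) =====
-- def _split_column_definitions(columns_str: str) -> list[str]:
--     """Split column definitions handling nested parentheses."""
--
--     def next_comma(s: str) -> int:
--         depth = 0
--         for i, ch in enumerate(s):
--             if ch == "(":
--                 depth += 1
--             elif ch == ")":
--                 depth -= 1
--             elif ch == "," and depth == 0:
--                 return i
--         return -1
--
--     segments = []
--     rest = columns_str
--     i = next_comma(rest)
--     while i != -1:
--         segments.append(rest[:i])
--         rest = rest[i + 1:]
--         i = next_comma(rest)
--     segments.append(rest)
--     return [p for p in (seg.strip() for seg in segments) if p]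
-- ===== Notes on version B (the rewrite author's own statement) =====
-- stated objective: alternative
-- what changed: B never builds a character buffer: it repeatedly locates the index of the next top-level comma, slices the segment out of the string, and strips/filters all raw segments in one final comprehension, instead of A's char-by-char accumulation with interleaved strip-and-append.
import Mathlib
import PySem

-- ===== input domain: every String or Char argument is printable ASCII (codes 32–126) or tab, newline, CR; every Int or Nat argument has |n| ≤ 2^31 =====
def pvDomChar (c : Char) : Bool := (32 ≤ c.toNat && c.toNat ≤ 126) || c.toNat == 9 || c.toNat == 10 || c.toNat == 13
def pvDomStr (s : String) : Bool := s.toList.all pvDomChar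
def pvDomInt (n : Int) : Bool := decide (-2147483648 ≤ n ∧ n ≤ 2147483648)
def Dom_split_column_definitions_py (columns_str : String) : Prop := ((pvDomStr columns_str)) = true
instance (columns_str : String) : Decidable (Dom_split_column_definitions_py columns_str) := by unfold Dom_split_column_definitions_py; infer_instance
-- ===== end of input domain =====

-- B locates top-level comma indices and slices segments out of the string, instead of A's char-by-char buffer accumulation; alternative decomposition, same cost.


-- ===== PORT A =====
-- A's for-loop: state (result, current buffer, paren depth), split at top-level commas.
def loopA : List Char → List (List Char) → List Char → Int → List (List Char)
  | [], res, cur, _ =>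
      if (PySem.Chars.strip cur).isEmpty = false then res ++ [PySem.Chars.strip cur] else res
  | c :: cs, res, cur, d =>
      if c = '(' then loopA cs res (cur ++ [c]) (d + 1)
      else if c = ')' then loopA cs res (cur ++ [c]) (d - 1)
      else if c = ',' ∧ d = 0 then
        loopA cs (if (PySem.Chars.strip cur).isEmpty = false then res ++ [PySem.Chars.strip cur] else res) [] 0
      else loopA cs res (cur ++ [c]) d

def split_column_definitions_py (columns_str : String) : List String :=
  (loopA columns_str.toList [] [] 0).map String.ofList

-- ===== PORT B =====
-- next_comma: scan enumerate(s) with a depth counter, return first top-level comma index, else -1.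
def nextCommaAux : List (Int × Char) → Int → Int
  | [], _ => -1
  | (i, c) :: rest, d =>
      if c = '(' then nextCommaAux rest (d + 1)
      else if c = ')' then nextCommaAux rest (d - 1)
      else if c = ',' ∧ d = 0 then i
      else nextCommaAux rest d

def nextComma (s : List Char) : Int := nextCommaAux (PySem.List.enumerate s) 0

-- termination fact for B's while loop (cited by name in decreasing_by)
theorem nextComma_bounds (s : List Char) (h : nextComma s ≠ -1) :
    0 ≤ nextComma s ∧ nextComma s < s.length := by
  have key : ∀ (l : List Char) (k d : Int), 0 ≤ k →
      nextCommaAux (PySem.List.enumerate l k) d ≠ -1 →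
      k ≤ nextCommaAux (PySem.List.enumerate l k) d ∧
        nextCommaAux (PySem.List.enumerate l k) d < k + l.length := by
    intro l
    induction l with
    | nil => intro k d hk hne; simp [PySem.List.enumerate_nil, nextCommaAux] at hne
    | cons c cs ih =>
        intro k d hk hne
        rw [PySem.List.enumerate_cons] at *
        simp only [nextCommaAux, List.length_cons] at *
        split_ifs at * with h1 h2 h3
        · have := ih (k + 1) (d + 1) (by omega) hne; omega
        · have := ih (k + 1) (d - 1) (by omega) hne; omega
        · omega
        · have := ih (k + 1) d (by omega) hne; omega
  have := key s 0 0 le_rfl h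
  unfold nextComma
  omega

-- B's while loop: slice the segment before the comma, continue on the part after it.
def whileLoopB (segments : List (List Char)) (rest : List Char) : List (List Char) :=
  let i := nextComma rest
  if h : i = -1 then segments ++ [rest]
  else
    whileLoopB (segments ++ [PySem.List.slice rest none (some i)])
      (PySem.List.slice rest (some (i + 1)) none)
termination_by rest.length
decreasing_by
  have hb := nextComma_bounds rest h
  rw [PySem.List.slice_from rest (a := nextComma rest + 1) (by omega)]
  simp only [List.length_drop]
  omega

def split_column_definitions_py_alt (columns_str : String) : List String :=
  (((whileLoopB [] columns_str.toList).map PySem.Chars.strip).filter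
      (fun p => p.isEmpty = false)).map String.ofList

-- ===== PRECONDITION & SPEC =====
def Spec_split_column_definitions_py (columns_str : String) (out : List String) : Prop := out = split_column_definitions_py_alt columns_str
instance (columns_str : String) (out : List String) : Decidable (Spec_split_column_definitions_py columns_str out) := by unfold Spec_split_column_definitions_py; infer_instance

-- ===== CLAIM (what is proved, stated in full; the proofs are below) =====
def Claim_equal_split_column_definitions_py : Prop := ∀ (columns_str : String), Dom_split_column_definitions_py columns_str → Spec_split_column_definitions_py columns_str (split_column_definitions_py columns_str)

-- ===== LEMMAS AND PROOFS =====

-- raw segments, A-shaped (proof-side reference splitter)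
def splitAux : List Char → Int → List Char → List (List Char)
  | [], _, cur => [cur]
  | c :: cs, d, cur =>
      if c = '(' then splitAux cs (d + 1) (cur ++ [c])
      else if c = ')' then splitAux cs (d - 1) (cur ++ [c])
      else if c = ',' ∧ d = 0 then cur :: splitAux cs 0 []
      else splitAux cs d (cur ++ [c])

-- strip every raw segment, keep the nonempty ones
def fs (xs : List (List Char)) : List (List Char) :=
  (xs.map PySem.Chars.strip).filter (fun p => p.isEmpty = false)

theorem fs_cons (cur : List Char) (t : List (List Char)) :
    fs (cur :: t) =
      (if (PySem.Chars.strip cur).isEmpty = false then [PySem.Chars.strip cur] else []) ++ fs t := by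
  simp only [fs, List.map_cons, List.filter_cons]
  by_cases h : (PySem.Chars.strip cur).isEmpty = false
  · simp [h]
  · simp only [Bool.not_eq_false] at h
    simp [h]

theorem loopA_splitAux : ∀ (cs : List Char) (res : List (List Char)) (cur : List Char) (d : Int),
    loopA cs res cur d = res ++ fs (splitAux cs d cur) := by
  intro cs
  induction cs with
  | nil =>
      intro res cur d
      simp only [loopA, splitAux, fs_cons]
      split_ifs with h <;> simp [fs]
  | cons c cs ih =>
      intro res cur d
      simp only [loopA, splitAux]
      split_ifs with h1 h2 h3 h4
      · exact ih _ _ _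
      · exact ih _ _ _
      · rw [ih, fs_cons]
        simp [h4]
      · rw [ih, fs_cons]
        simp [h4]
      · exact ih _ _ _

-- first top-level comma index (proof-side), and its link to nextCommaAux
def fc : List Char → Int → Option Nat
  | [], _ => none
  | c :: cs, d =>
      if c = '(' then (fc cs (d + 1)).map Nat.succ
      else if c = ')' then (fc cs (d - 1)).map Nat.succ
      else if c = ',' ∧ d = 0 then some 0
      else (fc cs d).map Nat.succ

theorem nextCommaAux_fc : ∀ (cs : List Char) (k d : Int),
    nextCommaAux (PySem.List.enumerate cs k) d =
      (match fc cs d with | none => -1 | some i => k + i) := by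
  intro cs
  induction cs with
  | nil => intro k d; simp [PySem.List.enumerate_nil, nextCommaAux, fc]
  | cons c cs ih =>
      intro k d
      rw [PySem.List.enumerate_cons]
      simp only [nextCommaAux, fc]
      split_ifs with h1 h2 h3
      · rw [ih]; cases fc cs (d + 1) with
        | none => simp
        | some v => simp; ring
      · rw [ih]; cases fc cs (d - 1) with
        | none => simp
        | some v => simp; ring
      · simp
      · rw [ih]; cases fc cs d with
        | none => simp
        | some v => simp; ring

theorem splitAux_fc : ∀ (cs : List Char) (d : Int) (cur : List Char),
    splitAux cs d cur =
      (match fc cs d with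
       | none => [cur ++ cs]
       | some i => (cur ++ cs.take i) :: splitAux (cs.drop (i + 1)) 0 []) := by
  intro cs
  induction cs with
  | nil => intro d cur; simp [splitAux, fc]
  | cons c cs ih =>
      intro d cur
      simp only [splitAux, fc]
      split_ifs with h1 h2 h3
      · rw [ih]; cases fc cs (d + 1) <;> simp
      · rw [ih]; cases fc cs (d - 1) <;> simp
      · simp
      · rw [ih]; cases fc cs d <;> simp

theorem nextComma_fc (rest : List Char) :
    nextComma rest = (match fc rest 0 with | none => -1 | some i => (i : Int)) := by
  unfold nextComma
  rw [nextCommaAux_fc]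
  cases fc rest 0 <;> simp

theorem nextComma_none (rest : List Char) (h : fc rest 0 = none) : nextComma rest = -1 := by
  rw [nextComma_fc, h]

theorem nextComma_some (rest : List Char) (i : Nat) (h : fc rest 0 = some i) :
    nextComma rest = (i : Int) := by
  rw [nextComma_fc, h]

theorem whileLoopB_splitAux_aux : ∀ (n : Nat) (rest : List Char), rest.length ≤ n →
    ∀ (segs : List (List Char)), whileLoopB segs rest = segs ++ splitAux rest 0 [] := by
  intro n
  induction n with
  | zero =>
      intro rest hlen segs
      have hrest : rest = [] := by
        cases rest with
        | nil => rfl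
        | cons a b => simp at hlen
      subst hrest
      rw [whileLoopB]
      have hnc : nextComma ([] : List Char) = -1 := by
        simp [nextComma, PySem.List.enumerate_nil, nextCommaAux]
      simp [hnc, splitAux]
  | succ n ih =>
      intro rest hlen segs
      rw [whileLoopB]
      by_cases h : nextComma rest = -1
      · have hnone : fc rest 0 = none := by
          cases hh : fc rest 0 with
          | none => rfl
          | some i => have := nextComma_some rest i hh; omega
        rw [splitAux_fc, hnone]
        simp [h]
      · have hb := nextComma_bounds rest h
        obtain ⟨i, hi⟩ : ∃ i, fc rest 0 = some i := by
          cases hh : fc rest 0 with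
          | none => exact absurd (nextComma_none rest hh) h
          | some i => exact ⟨i, rfl⟩
        have hfc := nextComma_some rest i hi
        simp only [h, dite_false]
        rw [PySem.List.slice_from rest (a := nextComma rest + 1) (by omega)]
        rw [PySem.List.slice_to rest (b := nextComma rest) (by omega)]
        have hdrop : ((nextComma rest + 1).toNat) = i + 1 := by omega
        have htake : (nextComma rest).toNat = i := by omega
        rw [hdrop, htake]
        have hlen' : (rest.drop (i + 1)).length ≤ n := by
          simp only [List.length_drop]
          omega
        rw [ih (rest.drop (i + 1)) hlen']
        conv_rhs => rw [splitAux_fc, hi]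
        simp

theorem whileLoopB_splitAux : ∀ (rest : List Char) (segs : List (List Char)),
    whileLoopB segs rest = segs ++ splitAux rest 0 [] := by
  intro rest segs
  exact whileLoopB_splitAux_aux rest.length rest le_rfl segs

-- ===== VERDICT (by name: the statement is the Claim_ definition above) =====
theorem split_column_definitions_py_spec : Claim_equal_split_column_definitions_py := by
  intro s _
  unfold Spec_split_column_definitions_py split_column_definitions_py split_column_definitions_py_alt
  rw [loopA_splitAux, whileLoopB_splitAux]
  simp only [List.nil_append, fs]
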